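-- pv_equiv track=rewrite | github.com/galtibi22/Fault_Isolation_Automatic_Generator | fi_generator/src/docx-troubleshooting-tamplate.py | fiStepDescriptionQuestion
-- ===== SOURCE A (Python) =====
-- def fiStepDescriptionQuestion(str):
--     objDesQue = {}
--     arrDesQue = str.split('.')
--
--     if('?' not in str):
--         objDesQue['fiStpDsc'] = str
--     else:
--         newDes = ""
--         for description in arrDesQue[:-1]:
--             newDes += description+"."
--         objDesQue['fiStpDsc'] = newDes
--         objDesQue['fiStpQst'] = arrDesQue[-1]
--
--     return objDesQue
-- ===== SOURCE B (Python) =====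
-- def fiStepDescriptionQuestion(str):
--     if '?' not in str:
--         return {'fiStpDsc': str}
--     desc = []
--     cur = []
--     for ch in str:
--         cur.append(ch)
--         if ch == '.':
--             desc.extend(cur)
--             cur = []
--     return {'fiStpDsc': ''.join(desc), 'fiStpQst': ''.join(cur)}
-- ===== Notes on version B (the rewrite author's own statement) =====
-- stated objective: alternative
-- what changed: Replaces the split-on-dot plus reconstruction loop over the leading parts with a single left-to-right character scan keeping two accumulators (flushed description and current segment), flushing the segment into the description at each dot; no split array is ever built.
import Mathlib
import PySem

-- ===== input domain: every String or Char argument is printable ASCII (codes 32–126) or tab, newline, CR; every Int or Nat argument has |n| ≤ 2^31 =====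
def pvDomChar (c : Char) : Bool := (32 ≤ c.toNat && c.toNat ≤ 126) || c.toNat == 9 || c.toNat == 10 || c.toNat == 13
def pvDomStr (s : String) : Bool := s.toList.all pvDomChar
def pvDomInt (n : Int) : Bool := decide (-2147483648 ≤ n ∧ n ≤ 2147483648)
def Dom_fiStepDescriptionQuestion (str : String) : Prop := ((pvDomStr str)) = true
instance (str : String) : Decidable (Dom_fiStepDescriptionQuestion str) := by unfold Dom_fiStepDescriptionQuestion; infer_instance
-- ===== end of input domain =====

-- B replaces A's split-on-dot plus reconstruction loop by a single character scan with two accumulators (alternative decomposition, same cost).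

-- ===== PORT A =====
def fiStepDescriptionQuestion (str : String) : List (String × String) :=
  let objDesQue : PySem.Dict String String := PySem.Dict.empty
  -- str.split('.'): the separator "." is non-empty, so Str.split? is always `some`
  let arrDesQue : List String := (PySem.Str.split? str ".").getD []
  if PySem.Str.isIn "?" str = false then
    (objDesQue.insert "fiStpDsc" str).items
  else
    let newDes : String :=
      (PySem.List.slice arrDesQue none (some (-1))).foldl (fun acc d => acc ++ d ++ ".") ""
    ((objDesQue.insert "fiStpDsc" newDes).insert "fiStpQst"
      (PySem.List.pyGetD arrDesQue (-1) "")).items   -- arrDesQue is never empty, so index -1 is in range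

-- ===== PORT B =====
def fiStepDescriptionQuestion_alt (str : String) : List (String × String) :=
  if PySem.Str.isIn "?" str = false then
    [("fiStpDsc", str)]
  else
    -- single pass over the characters: cur collects the current segment,
    -- desc is flushed with cur (including the dot) at every '.'
    let p := str.toList.foldl
      (fun (st : List Char × List Char) ch =>
        let cur := st.2 ++ [ch]
        if ch = '.' then (st.1 ++ cur, ([] : List Char)) else (st.1, cur))
      ([], [])
    [("fiStpDsc", String.ofList p.1), ("fiStpQst", String.ofList p.2)]

-- ===== PRECONDITION & SPEC =====
def Spec_fiStepDescriptionQuestion (str : String) (out : List (String × String)) : Prop := out = fiStepDescriptionQuestion_alt str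
instance (str : String) (out : List (String × String)) : Decidable (Spec_fiStepDescriptionQuestion str out) := by unfold Spec_fiStepDescriptionQuestion; infer_instance

-- ===== CLAIM (what is proved, stated in full; the proofs are below) =====
def Claim_equal_fiStepDescriptionQuestion : Prop := ∀ (str : String), Dom_fiStepDescriptionQuestion str → Spec_fiStepDescriptionQuestion str (fiStepDescriptionQuestion str)

-- ===== LEMMAS AND PROOFS =====

-- a simple structural recursion equal to PySem.Chars.splitOn · ['.']
def sp : List Char → List (List Char)
  | [] => [[]]
  | c :: rest => if c = '.' then [] :: sp rest else (c :: (sp rest).headI) :: (sp rest).tail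

theorem sp_ne_nil (cs : List Char) : sp cs ≠ [] := by
  cases cs with
  | nil => simp [sp]
  | cons c rest => simp only [sp]; split <;> simp

theorem sp_go_spec (fuel : Nat) (l cur : List Char) (acc : List (List Char))
    (h : l.length < fuel) :
    PySem.Chars.splitOn.go ['.'] fuel l cur acc
      = acc.reverse ++ (cur.reverse ++ (sp l).headI) :: (sp l).tail := by
  induction fuel generalizing l cur acc with
  | zero => omega
  | succ f ih =>
    cases l with
    | nil => simp [PySem.Chars.splitOn.go, sp]
    | cons c rest =>
      by_cases hc : c = '.'
      · subst hc
        have hp : List.isPrefixOf ['.'] ('.' :: rest) = true := by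
          simp [List.isPrefixOf]
        have step : PySem.Chars.splitOn.go ['.'] (f+1) ('.' :: rest) cur acc
              = PySem.Chars.splitOn.go ['.'] f rest [] (cur.reverse :: acc) := by
          simp [PySem.Chars.splitOn.go, hp]
        rw [step, ih rest [] (cur.reverse :: acc) (by simpa using Nat.lt_of_succ_lt_succ h)]
        have hne := sp_ne_nil rest
        cases hsp : sp rest with
        | nil => exact absurd hsp hne
        | cons p ps => simp [sp, hsp]
      · have hp : List.isPrefixOf ['.'] (c :: rest) = false := by
          simp [List.isPrefixOf]
          intro h'; exact hc h'.symm
        have step : PySem.Chars.splitOn.go ['.'] (f+1) (c :: rest) cur acc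
              = PySem.Chars.splitOn.go ['.'] f rest (c :: cur) acc := by
          simp [PySem.Chars.splitOn.go, hp]
        rw [step, ih rest (c :: cur) acc (by simpa using Nat.lt_of_succ_lt_succ h)]
        simp [sp, hc]

theorem splitOn_eq_sp (cs : List Char) : PySem.Chars.splitOn cs ['.'] = sp cs := by
  have := sp_go_spec (cs.length + 1) cs [] [] (by omega)
  rw [PySem.Chars.splitOn, this]
  have hne := sp_ne_nil cs
  cases hsp : sp cs with
  | nil => exact absurd hsp hne
  | cons p ps => simp

theorem sp_append_dot (ys : List Char) : sp (ys ++ ['.']) = sp ys ++ [[]] := by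
  induction ys with
  | nil => simp [sp]
  | cons y t ih =>
    by_cases hy : y = '.'
    · simp [sp, hy, ih]
    · have hne := sp_ne_nil t
      cases hsp : sp t with
      | nil => exact absurd hsp hne
      | cons p ps =>
        rw [hsp] at ih
        simp [sp, hy, ih, hsp]

theorem sp_append_ne (ys : List Char) (c : Char) (hc : c ≠ '.') :
    sp (ys ++ [c]) = (sp ys).dropLast ++ [(sp ys).getLastD [] ++ [c]] := by
  induction ys with
  | nil => simp [sp, hc]
  | cons y t ih =>
    have hne := sp_ne_nil t
    cases hsp : sp t with
    | nil => exact absurd hsp hne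
    | cons p ps =>
      rw [hsp] at ih
      by_cases hy : y = '.'
      · subst hy
        simp only [List.cons_append, sp, ih, hsp]
        cases ps <;> simp
      · simp only [List.cons_append, sp, if_neg hy, ih, hsp]
        cases ps <;> simp

-- A's two fields, as lists of characters
def aDsc (cs : List Char) : List Char := ((sp cs).dropLast.map (· ++ ['.'])).flatten
def aQst (cs : List Char) : List Char := (sp cs).getLastD []

-- B's scan, abbreviated
def scan (cs : List Char) : List Char × List Char :=
  cs.foldl
    (fun (st : List Char × List Char) ch =>
      let cur := st.2 ++ [ch]
      if ch = '.' then (st.1 ++ cur, ([] : List Char)) else (st.1, cur))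
    ([], [])

theorem getLast_eq_getLastD_nil {α : Type} (xs : List α) (h : xs ≠ []) (d : α) :
    xs.getLast h = xs.getLastD d := by
  cases xs with
  | nil => exact absurd rfl h
  | cons a l =>
    rw [List.getLast_eq_getLastD]
    induction l generalizing a with
    | nil => rfl
    | cons b m ih => cases m <;> simp_all [List.getLastD]

theorem scan_spec (cs : List Char) : scan cs = (aDsc cs, aQst cs) := by
  induction cs using List.reverseRecOn with
  | nil => simp [scan, aDsc, aQst, sp]
  | append_singleton ys c ih =>
    have hstep : scan (ys ++ [c])
        = (let cur := (scan ys).2 ++ [c];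
           if c = '.' then ((scan ys).1 ++ cur, ([] : List Char)) else ((scan ys).1, cur)) := by
      simp [scan, List.foldl_append]
    rw [hstep, ih]
    have hne : sp ys ≠ [] := sp_ne_nil ys
    by_cases hc : c = '.'
    · subst hc
      simp only [if_true]
      rw [Prod.mk.injEq]
      constructor
      · -- aDsc ys ++ (aQst ys ++ ['.']) = aDsc (ys ++ ['.'])
        show aDsc ys ++ (aQst ys ++ ['.']) = aDsc (ys ++ ['.'])
        unfold aDsc aQst
        rw [sp_append_dot, List.dropLast_concat]
        conv_rhs => rw [← List.dropLast_append_getLast hne]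
        rw [getLast_eq_getLastD_nil _ hne []]
        simp
      · show ([] : List Char) = aQst (ys ++ ['.'])
        unfold aQst
        rw [sp_append_dot]
        simp
    · simp only [if_neg hc]
      rw [Prod.mk.injEq]
      constructor
      · show aDsc ys = aDsc (ys ++ [c])
        unfold aDsc
        rw [sp_append_ne ys c hc, List.dropLast_concat]
      · show aQst ys ++ [c] = aQst (ys ++ [c])
        unfold aQst
        rw [sp_append_ne ys c hc]
        simp

theorem foldl_ofList (ps : List (List Char)) (a : String) :
    (ps.map String.ofList).foldl (fun acc d => acc ++ d ++ ".") a
      = String.ofList (a.toList ++ (ps.map (· ++ ['.'])).flatten) := by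
  induction ps generalizing a with
  | nil => simp
  | cons p rest ih =>
    simp only [List.map_cons, List.foldl_cons, ih]
    apply String.ext
    simp [String.toList_append]

-- ===== VERDICT (by name: the statement is the Claim_ definition above) =====
theorem fiStepDescriptionQuestion_spec : Claim_equal_fiStepDescriptionQuestion := by
  unfold Claim_equal_fiStepDescriptionQuestion
  intro str _
  unfold Spec_fiStepDescriptionQuestion fiStepDescriptionQuestion fiStepDescriptionQuestion_alt
  by_cases hq : PySem.Str.isIn "?" str = false
  · simp only [hq, if_true]
    simp [PySem.Dict.insert, PySem.Dict.empty, PySem.Dict.contains]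
  · rw [if_neg hq, if_neg hq]
    have harr : (PySem.Str.split? str ".").getD [] = (sp str.toList).map String.ofList := by
      simp [PySem.Str.split?, PySem.Chars.split?, splitOn_eq_sp]
    have hne : sp str.toList ≠ [] := sp_ne_nil str.toList
    have hmne : (sp str.toList).map String.ofList ≠ [] := by simpa using hne
    simp only [harr, PySem.List.slice_to_neg_one, ← List.map_dropLast,
      PySem.List.pyGetD_neg_one _ _ hmne, foldl_ofList]
    have hq' : ((sp str.toList).map String.ofList).getLast hmne
        = String.ofList (aQst str.toList) := by
      rw [List.getLast_map, getLast_eq_getLastD_nil _ hne []]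
      rfl
    have hd' : String.ofList (String.toList "" ++ ((sp str.toList).dropLast.map (· ++ ['.'])).flatten)
        = String.ofList (aDsc str.toList) := by
      apply String.ext; simp [aDsc]
    rw [hq', hd']
    have hs : str.toList.foldl
        (fun (st : List Char × List Char) ch =>
          let cur := st.2 ++ [ch]
          if ch = '.' then (st.1 ++ cur, ([] : List Char)) else (st.1, cur))
        ([], []) = (aDsc str.toList, aQst str.toList) := scan_spec str.toList
    rw [hs]
    simp [PySem.Dict.insert, PySem.Dict.empty, PySem.Dict.contains]
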